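-- pv_equiv track=rewrite | github.com/PeterSR/print-tools | print_tools/utils/layouting/helpers.py | quarter_fold_order
-- ===== SOURCE A (Python) =====
-- def quarter_fold_order(pages: int) -> list[int]:
--     """Four-up quarter-fold imposition (TL,TR,BL,BR for each side)."""
--     if pages % 8:
--         raise ValueError("Quarter-fold needs pages multiple of 8.")
--     out: list[int] = []
--     sheets = pages // 8
--     for k in range(sheets):
--         # front
--         out += [
--             pages - 4 * k,          # TL
--             2 * k + 1,              # TR
--             2 * k + 2,              # BL
--             pages - (4 * k + 1)     # BR
--         ]
--         # back
--         out += [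
--             pages - (4 * k + 2),    # TL
--             2 * k + 3,              # TR
--             2 * k + 4,              # BL
--             pages - (4 * k + 3)     # BR
--         ]
--     return out
-- ===== SOURCE B (Python) =====
-- def quarter_fold_order(pages: int) -> list[int]:
--     """Four-up quarter-fold imposition (TL,TR,BL,BR for each side)."""
--     if pages % 8:
--         raise ValueError("Quarter-fold needs pages multiple of 8.")
--     out: list[int] = []
--     hi = pages
--     for h in range(pages // 4):   # one row of four cells per half-sheet (front or back)
--         b = h + (h & 1)           # low-side base for this half-sheet
--         out += [hi, b + 1, b + 2, hi - 1]
--         hi -= 2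
--     return out
-- ===== Notes on version B (the rewrite author's own statement) =====
-- stated objective: alternative
-- what changed: B replaces A's per-sheet loop that appends two closed-form four-element blocks (8 values per iteration from sheet index k) by a half-sheet loop over pages//4 rows of four, carrying a single descending high pointer in the loop state and deriving the low-side base as h + (h & 1).
import Mathlib
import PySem

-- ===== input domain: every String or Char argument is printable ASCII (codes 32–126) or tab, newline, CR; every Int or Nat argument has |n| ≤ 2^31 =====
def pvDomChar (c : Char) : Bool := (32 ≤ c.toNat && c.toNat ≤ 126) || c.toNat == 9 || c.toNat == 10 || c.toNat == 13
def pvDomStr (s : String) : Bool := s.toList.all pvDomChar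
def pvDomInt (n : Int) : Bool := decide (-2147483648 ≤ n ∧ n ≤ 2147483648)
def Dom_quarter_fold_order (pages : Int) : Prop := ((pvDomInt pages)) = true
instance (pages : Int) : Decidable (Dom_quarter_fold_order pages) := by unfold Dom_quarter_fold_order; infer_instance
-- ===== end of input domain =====

-- B replaces A's per-sheet eight-element closed-form blocks by a half-sheet (row-of-four) loop
-- driven by one descending high pointer; same return values (objective: alternative decomposition).

-- ===== PORT A =====
-- A loops over whole sheets (pages // 8), appending two four-element lists per sheet,
-- each entry computed in closed form from the sheet index k.
def quarter_fold_order (pages : Int) : List Int :=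
  if PySem.Int.mod pages 8 ≠ 0 then []  -- Python raises ValueError here; excluded by Pre_
  else
    let sheets := PySem.Int.floordiv pages 8
    (PySem.List.pyRange 0 sheets 1).foldl (fun out k =>
      (out ++ [pages - 4 * k, 2 * k + 1, 2 * k + 2, pages - (4 * k + 1)]) ++
      [pages - (4 * k + 2), 2 * k + 3, 2 * k + 4, pages - (4 * k + 3)]) []

-- ===== PORT B =====
-- B loops over half-sheets (pages // 4), carrying a descending high pointer hi in the fold
-- state and deriving the low-side base b = h + (h & 1) from the half-sheet index.
def quarter_fold_order_alt (pages : Int) : List Int :=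
  if PySem.Int.mod pages 8 ≠ 0 then []  -- Python raises ValueError here; excluded by Pre_
  else
    ((PySem.List.pyRange 0 (PySem.Int.floordiv pages 4) 1).foldl
      (fun (st : Int × List Int) h =>
        let b := h + PySem.Int.mod h 2  -- h & 1 = h % 2 for the nonnegative h of range()
        (st.1 - 2, st.2 ++ [st.1, b + 1, b + 2, st.1 - 1]))
      (pages, [])).2

-- ===== PRECONDITION & SPEC =====
-- A raises ValueError exactly when pages % 8 ≠ 0; Pre_ excludes exactly those inputs.
def Pre_quarter_fold_order (pages : Int) : Prop := PySem.Int.mod pages 8 = 0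
instance (pages : Int) : Decidable (Pre_quarter_fold_order pages) := by
  unfold Pre_quarter_fold_order; infer_instance
def pvWitness_quarter_fold_order : Int := (16)
def Spec_quarter_fold_order (pages : Int) (out : List Int) : Prop := out = quarter_fold_order_alt pages
instance (pages : Int) (out : List Int) : Decidable (Spec_quarter_fold_order pages out) := by unfold Spec_quarter_fold_order; infer_instance

-- ===== CLAIM (what is proved, stated in full; the proofs are below) =====
def Claim_equal_quarter_fold_order : Prop := ∀ (pages : Int), Dom_quarter_fold_order pages → Pre_quarter_fold_order pages → Spec_quarter_fold_order pages (quarter_fold_order pages)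

-- ===== LEMMAS AND PROOFS =====

-- A's fold over sheet indices, in closed form.
lemma pvA_fold (p : Int) (n : Nat) :
    ((List.range n).map (fun k : Nat => (0 : Int) + k)).foldl (fun out k =>
        (out ++ [p - 4 * k, 2 * k + 1, 2 * k + 2, p - (4 * k + 1)]) ++
        [p - (4 * k + 2), 2 * k + 3, 2 * k + 4, p - (4 * k + 3)]) []
    = (List.range n).flatMap (fun k : Nat =>
        [p - 4 * k, 2 * k + 1, 2 * k + 2, p - (4 * k + 1),
         p - (4 * k + 2), 2 * k + 3, 2 * k + 4, p - (4 * k + 3)]) := by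
  induction n with
  | zero => simp
  | succ m ih =>
    rw [List.range_succ]
    simp only [List.map_append, List.foldl_append, ih, List.flatMap_append]
    simp

-- B's fold over half-sheet indices, in closed form (the high pointer at step h is p - 2*h).
lemma pvB_fold (p : Int) (n : Nat) :
    (((List.range n).map (fun k : Nat => (0 : Int) + k)).foldl
        (fun (st : Int × List Int) h =>
          let b := h + PySem.Int.mod h 2
          (st.1 - 2, st.2 ++ [st.1, b + 1, b + 2, st.1 - 1]))
        (p, []))
    = (p - 2 * n, (List.range n).flatMap (fun h : Nat =>
        [p - 2 * h, (h : Int) + PySem.Int.mod h 2 + 1,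
         (h : Int) + PySem.Int.mod h 2 + 2, p - 2 * h - 1])) := by
  induction n with
  | zero => simp
  | succ m ih =>
    rw [List.range_succ]
    simp only [List.map_append, List.foldl_append, ih, List.map_cons, List.map_nil,
      List.foldl_cons, List.foldl_nil, List.flatMap_append, List.flatMap_cons,
      List.flatMap_nil, List.append_nil, Prod.mk.injEq]
    refine ⟨by push_cast; ring, ?_⟩
    simp only [zero_add]

lemma pvMod_two_even (m : Nat) : PySem.Int.mod ((2 * m : Nat) : Int) 2 = 0 := by
  rw [PySem.Int.mod_eq_emod_of_pos (by norm_num)]; omega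

lemma pvMod_two_odd (m : Nat) : PySem.Int.mod ((2 * m + 1 : Nat) : Int) 2 = 1 := by
  rw [PySem.Int.mod_eq_emod_of_pos (by norm_num)]; omega

-- One A-sheet equals its two B-half-sheets, summed over the whole range.
lemma pvFlat_eq (p : Int) (n : Nat) :
    (List.range (2 * n)).flatMap (fun h : Nat =>
        [p - 2 * h, (h : Int) + PySem.Int.mod h 2 + 1,
         (h : Int) + PySem.Int.mod h 2 + 2, p - 2 * h - 1])
    = (List.range n).flatMap (fun k : Nat =>
        [p - 4 * k, 2 * k + 1, 2 * k + 2, p - (4 * k + 1),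
         p - (4 * k + 2), 2 * k + 3, 2 * k + 4, p - (4 * k + 3)]) := by
  induction n with
  | zero => simp
  | succ m ih =>
    have h2 : 2 * (m + 1) = (2 * m + 1) + 1 := by omega
    rw [h2, List.range_succ, List.range_succ, List.range_succ (n := m)]
    simp only [List.flatMap_append, List.flatMap_cons, List.flatMap_nil, ih]
    rw [List.append_assoc, List.append_cancel_left_eq]
    simp only [List.append_nil, pvMod_two_even, pvMod_two_odd]
    push_cast
    ring_nf
    simp

-- ===== VERDICT (by name: the statement is the Claim_ definition above) =====
theorem quarter_fold_order_spec : Claim_equal_quarter_fold_order := by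
  intro pages _ hpre
  unfold Pre_quarter_fold_order at hpre
  unfold Spec_quarter_fold_order quarter_fold_order quarter_fold_order_alt
  rw [if_neg (not_not_intro hpre), if_neg (not_not_intro hpre)]
  obtain ⟨t, ht⟩ : (8 : Int) ∣ pages :=
    (PySem.Int.mod_eq_zero_iff_dvd pages 8).mp hpre
  subst ht
  have h8 : PySem.Int.floordiv (8 * t) 8 = t := by
    rw [PySem.Int.floordiv_eq_ediv_of_pos (by norm_num)]; omega
  have h4 : PySem.Int.floordiv (8 * t) 4 = 2 * t := by
    rw [PySem.Int.floordiv_eq_ediv_of_pos (by norm_num)]; omega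
  simp only [h8, h4, PySem.List.pyRange_one]
  rcases (show t ≤ 0 ∨ 0 < t by omega) with hle | hpos
  · have e1 : (t - 0).toNat = 0 := by omega
    have e2 : (2 * t - 0).toNat = 0 := by omega
    rw [e1, e2]
    simp
  · obtain ⟨n, hn⟩ : ∃ n : Nat, t = (n : Int) := ⟨t.toNat, by omega⟩
    subst hn
    have e1 : ((n : Int) - 0).toNat = n := by omega
    have e2 : (2 * (n : Int) - 0).toNat = 2 * n := by omega
    rw [e1, e2]
    rw [pvA_fold, pvB_fold, pvFlat_eq]
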